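-- pv_equiv track=rewrite | github.com/TournamentStreamHelper/ControllerDatabase | .utilities/generate_controller_tables.py | process_socd
-- ===== SOURCE A (Python) =====
-- def bool_to_emoji(boolean: bool):
--     if boolean:
--         return("✔️")
--     else:
--         return("❌")
--
-- def process_socd(list_socd):
--     result = ""
--     if list_socd:
--         for i in range(len(list_socd)):
--             if i != 0:
--                 if i == len(list_socd)-1:
--                     result += " or "
--                 else:
--                     result += ", "
--             if list_socd[i] == "disable":
--                 result += "Disabled"
--             if list_socd[i] == "neutral":
--                 result += "Neutral"
--             if list_socd[i] == "last_input":
--                 result += "Last Direction"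
--             if list_socd[i] == "first_input":
--                 result += "First Direction"
--             if list_socd[i] == "up":
--                 result += "Always Up"
--     else:
--         result += bool_to_emoji(False)
--     return(result)
-- ===== SOURCE B (Python) =====
-- NAMES = {"disable": "Disabled", "neutral": "Neutral",
--          "last_input": "Last Direction", "first_input": "First Direction",
--          "up": "Always Up"}
--
-- def process_socd(list_socd):
--     if not list_socd:
--         return "❌"
--     # build the pieces back-to-front: walking from the end, the first boundary
--     # crossed is the " or " one, every later boundary is ", "
--     parts = []
--     for k, code in enumerate(reversed(list_socd)):
--         if k == 1:
--             parts.append(" or ")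
--         elif k > 1:
--             parts.append(", ")
--         parts.append(NAMES.get(code, ""))
--     parts.reverse()
--     return "".join(parts)
-- ===== Notes on version B (the rewrite author's own statement) =====
-- stated objective: alternative
-- what changed: B builds the output back-to-front: it walks the reversed list collecting label/separator pieces (the first boundary crossed from the end is ' or ', every later one ', '), then reverses the piece list and joins it, instead of A's forward index loop whose separator branch compares each index with len-1 and whose label comes from five sequential equality checks.
import Mathlib
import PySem

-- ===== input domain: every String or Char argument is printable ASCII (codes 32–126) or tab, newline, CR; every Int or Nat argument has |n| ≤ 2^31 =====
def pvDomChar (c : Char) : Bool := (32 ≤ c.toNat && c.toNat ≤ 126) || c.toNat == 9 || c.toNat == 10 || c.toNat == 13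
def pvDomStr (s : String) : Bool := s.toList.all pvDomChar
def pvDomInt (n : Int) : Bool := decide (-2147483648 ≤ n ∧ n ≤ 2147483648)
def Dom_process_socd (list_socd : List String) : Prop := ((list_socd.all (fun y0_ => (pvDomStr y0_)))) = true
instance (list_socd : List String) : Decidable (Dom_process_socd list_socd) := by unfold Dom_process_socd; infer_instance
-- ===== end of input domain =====

-- B builds the result back-to-front: it walks the reversed list collecting label/separator
-- pieces (" or " at the first boundary from the end, ", " later), then reverses and joins them.

-- ===== PORT A =====
def bool_to_emoji (boolean : Bool) : String :=
  if boolean then "✔️" else "❌"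

-- literal transliteration of A; list_socd[i] is PySem.List.pyGetD (exact: i is always in range here)
def process_socd (list_socd : List String) : String :=
  if list_socd ≠ [] then
    (PySem.List.pyRange 0 list_socd.length).foldl (fun result i =>
      let result := if i ≠ 0 then
          (if i = (list_socd.length : Int) - 1 then result ++ " or " else result ++ ", ")
        else result
      let result := if PySem.List.pyGetD list_socd i "" = "disable" then result ++ "Disabled" else result
      let result := if PySem.List.pyGetD list_socd i "" = "neutral" then result ++ "Neutral" else result
      let result := if PySem.List.pyGetD list_socd i "" = "last_input" then result ++ "Last Direction" else result
      let result := if PySem.List.pyGetD list_socd i "" = "first_input" then result ++ "First Direction" else result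
      if PySem.List.pyGetD list_socd i "" = "up" then result ++ "Always Up" else result) ""
  else "" ++ bool_to_emoji false

-- ===== PORT B =====
def socdNames : PySem.Dict String String :=
  ⟨[("disable", "Disabled"), ("neutral", "Neutral"), ("last_input", "Last Direction"),
    ("first_input", "First Direction"), ("up", "Always Up")]⟩

-- transliteration of Source B's loop: for k, code in enumerate(reversed(list_socd)) is a
-- foldl over PySem.List.enumerate of the reversed list; parts.append is list snoc;
-- "".join(reversed(parts)) is PySem.Str.join "" of the reversed parts
def process_socd_alt (list_socd : List String) : String :=
  if list_socd = [] then "❌"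
  else
    let parts := (PySem.List.enumerate list_socd.reverse 0).foldl
      (fun parts kc =>
        let parts := if kc.1 = 1 then parts ++ [" or "]
          else if kc.1 > 1 then parts ++ [", "] else parts
        parts ++ [PySem.Dict.getD socdNames kc.2 ""]) []
    PySem.Str.join "" parts.reverse

-- ===== PRECONDITION & SPEC =====
def Spec_process_socd (list_socd : List String) (out : String) : Prop := out = process_socd_alt list_socd
instance (list_socd : List String) (out : String) : Decidable (Spec_process_socd list_socd out) := by unfold Spec_process_socd; infer_instance

-- ===== CLAIM (what is proved, stated in full; the proofs are below) =====
def Claim_equal_process_socd : Prop := ∀ (list_socd : List String), Dom_process_socd list_socd → Spec_process_socd list_socd (process_socd list_socd)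

-- ===== LEMMAS AND PROOFS =====

-- the label a code maps to (B's dict lookup)
def pvLbl (x : String) : String := PySem.Dict.getD socdNames x ""

-- A's separator as a function of position
def pvSep (n i : Int) : String := if i = 0 then "" else if i = n - 1 then " or " else ", "

-- A's five sequential ifs append exactly the dict label
theorem pvChainA (r x : String) :
    (let r1 := if x = "disable" then r ++ "Disabled" else r
     let r2 := if x = "neutral" then r1 ++ "Neutral" else r1
     let r3 := if x = "last_input" then r2 ++ "Last Direction" else r2
     let r4 := if x = "first_input" then r3 ++ "First Direction" else r3
     if x = "up" then r4 ++ "Always Up" else r4) = r ++ pvLbl x := by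
  by_cases h1 : x = "disable"
  · subst h1; simp [pvLbl, socdNames, PySem.Dict.getD, PySem.Dict.get?]
  by_cases h2 : x = "neutral"
  · subst h2; simp [pvLbl, socdNames, PySem.Dict.getD, PySem.Dict.get?]
  by_cases h3 : x = "last_input"
  · subst h3; simp [pvLbl, socdNames, PySem.Dict.getD, PySem.Dict.get?]
  by_cases h4 : x = "first_input"
  · subst h4; simp [pvLbl, socdNames, PySem.Dict.getD, PySem.Dict.get?]
  by_cases h5 : x = "up"
  · subst h5; simp [pvLbl, socdNames, PySem.Dict.getD, PySem.Dict.get?]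
  · simp [pvLbl, socdNames, PySem.Dict.getD, PySem.Dict.get?, h1, h2, h3, h4, h5,
      beq_false_of_ne (Ne.symm h1), beq_false_of_ne (Ne.symm h2), beq_false_of_ne (Ne.symm h3),
      beq_false_of_ne (Ne.symm h4), beq_false_of_ne (Ne.symm h5), String.append_empty]

-- A's loop body equals "append separator then label"
theorem pvStep (xs : List String) (acc : String) (i : Int) :
    (let r0 := if i ≠ 0 then
          (if i = (xs.length : Int) - 1 then acc ++ " or " else acc ++ ", ")
        else acc
     let r1 := if PySem.List.pyGetD xs i "" = "disable" then r0 ++ "Disabled" else r0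
     let r2 := if PySem.List.pyGetD xs i "" = "neutral" then r1 ++ "Neutral" else r1
     let r3 := if PySem.List.pyGetD xs i "" = "last_input" then r2 ++ "Last Direction" else r2
     let r4 := if PySem.List.pyGetD xs i "" = "first_input" then r3 ++ "First Direction" else r3
     if PySem.List.pyGetD xs i "" = "up" then r4 ++ "Always Up" else r4)
      = acc ++ (pvSep xs.length i ++ pvLbl (PySem.List.pyGetD xs i "")) := by
  rw [pvChainA]
  by_cases h0 : i = 0
  · simp [pvSep, h0, String.empty_append]
  by_cases hl : i = (xs.length : Int) - 1
  · subst hl; simp [pvSep, h0, String.append_assoc]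
  · simp [pvSep, h0, hl, String.append_assoc]

-- A in separator/label form
theorem pvAform (xs : List String) (h : xs ≠ []) :
    process_socd xs = (PySem.List.pyRange 0 xs.length).foldl
      (fun r i => r ++ (pvSep xs.length i ++ pvLbl (PySem.List.pyGetD xs i ""))) "" := by
  unfold process_socd
  rw [if_pos h]
  exact PySem.List.foldl_congr_mem _ _ _ _ (fun acc i _ => pvStep xs acc i)

-- pyRange 0 (n+1) splits as a snoc
theorem pvRangeSucc (n : Nat) :
    PySem.List.pyRange 0 ((n + 1 : Nat) : Int) = PySem.List.pyRange 0 (n : Nat) ++ [(n : Int)] := by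
  push_cast
  exact PySem.List.pyRange_one_succ_right (by positivity)

-- the ", "-separated label chain, as a recursion (used to characterise both programs)
def pvComma : List String → String
  | [] => ""
  | [x] => pvLbl x
  | x :: y :: r => pvLbl x ++ ", " ++ pvComma (y :: r)

theorem pvCommaSnoc (xs : List String) (z : String) (h : xs ≠ []) :
    pvComma (xs ++ [z]) = pvComma xs ++ ", " ++ pvLbl z := by
  induction xs with
  | nil => simp at h
  | cons a t ih =>
    cases t with
    | nil => simp [pvComma]
    | cons b r =>
      have : ((a :: b :: r) ++ [z]) = a :: ((b :: r) ++ [z]) := by simp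
      rw [this]
      have hne : (b :: r) ++ [z] ≠ [] := by simp
      rcases e : (b :: r) ++ [z] with _ | ⟨c, s⟩
      · simp at e
      · rw [show pvComma (a :: c :: s) = pvLbl a ++ ", " ++ pvComma (c :: s) from rfl, ← e,
          ih (by simp)]
        simp [pvComma, String.append_assoc]

-- the comma fold over indices 0..m-1 equals pvComma of the first m elements
theorem pvMid (xs : List String) (m : Nat) (h1 : 1 ≤ m) (h2 : m ≤ xs.length) :
    (PySem.List.pyRange 0 (m : Int)).foldl
        (fun r i => r ++ ((if i = 0 then "" else ", ") ++ pvLbl (PySem.List.pyGetD xs i ""))) ""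
      = pvComma (xs.take m) := by
  induction m, h1 using Nat.le_induction with
  | base =>
    have hsing : PySem.List.pyRange 0 ((1:Nat) : Int) = [0] := by
      simpa using PySem.List.pyRange_one_singleton (a := 0)
    rw [hsing]
    cases xs with
    | nil => simp at h2
    | cons a t =>
      simp only [List.foldl_cons, List.foldl_nil]
      rw [show (PySem.List.pyGetD (a :: t) (0:Int) "") = a from by
        rw [show (0:Int) = ((0:Nat):Int) from rfl, PySem.List.pyGetD_natCast]; rfl]
      simp [pvComma, String.empty_append]
  | succ k hk ih =>
    have hkl : k < xs.length := by omega
    rw [pvRangeSucc, List.foldl_append, ih (by omega)]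
    have hk0 : ((k:Int) = 0) = False := by simp; omega
    simp only [List.foldl, hk0, if_false]
    rw [PySem.List.pyGetD_eq_getElem xs "" (by positivity) (by exact_mod_cast hkl)]
    have htake : xs.take (k+1) = xs.take k ++ [xs[k]'hkl] := by
      rw [List.take_add_one, List.getElem?_eq_getElem hkl]; rfl
    rw [htake, pvCommaSnoc _ _ (by
      intro hnil
      have hl := congrArg List.length hnil
      rw [List.length_take, List.length_nil] at hl
      omega)]
    simp [String.append_assoc]

-- ---------- B-side lemmas ----------

-- "".join on cons
theorem pvJoin0Cons (a : String) (zs : List String) :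
    PySem.Str.join "" (a :: zs) = a ++ PySem.Str.join "" zs := by
  cases zs with
  | nil =>
    apply String.toList_inj.mp
    simp [PySem.Str.toList_join, PySem.Chars.join_singleton, PySem.Chars.join_nil]
  | cons b r =>
    apply String.toList_inj.mp
    simp [PySem.Str.toList_join, PySem.Chars.join_cons_cons]

theorem pvJoin0Nil : PySem.Str.join "" ([] : List String) = "" := by
  apply String.toList_inj.mp
  simp [PySem.Str.toList_join, PySem.Chars.join_nil]

-- the tail of B's loop (all indices > 1) just extends with [", ", label]
theorem pvPartsTail (t : List (Int × String)) (acc : List String)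
    (h : ∀ p ∈ t, (1 : Int) < p.1) :
    t.foldl (fun parts kc =>
        let parts := if kc.1 = 1 then parts ++ [" or "]
          else if kc.1 > 1 then parts ++ [", "] else parts
        parts ++ [PySem.Dict.getD socdNames kc.2 ""]) acc
      = acc ++ t.flatMap (fun kc => [", ", pvLbl kc.2]) := by
  rw [PySem.List.foldl_congr_mem _ _ (fun parts kc => parts ++ [", ", pvLbl kc.2]) _
    (fun acc' p hp => by
      have h1 := h p hp
      simp only [show (p.1 = 1) = False from by simp; omega, if_false, if_pos h1, pvLbl]
      simp)]
  exact PySem.List.foldl_append_eq_flatMap _ _ _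

-- index-irrelevance: flatMap over an enumerate ignores the indices
theorem pvFlatEnum (t : List String) (s : Int) :
    (PySem.List.enumerate t s).flatMap (fun kc => [", ", pvLbl kc.2])
      = t.flatMap (fun y => [", ", pvLbl y]) := by
  induction t generalizing s with
  | nil => simp [PySem.List.enumerate_nil]
  | cons a r ih => simp [PySem.List.enumerate_cons, ih]

-- B's parts list, for a (reversed) input with at least two elements
theorem pvPartsChar (y0 y1 : String) (t : List String) :
    (PySem.List.enumerate (y0 :: y1 :: t) 0).foldl
      (fun parts kc =>
        let parts := if kc.1 = 1 then parts ++ [" or "]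
          else if kc.1 > 1 then parts ++ [", "] else parts
        parts ++ [PySem.Dict.getD socdNames kc.2 ""]) []
      = [pvLbl y0, " or ", pvLbl y1] ++ t.flatMap (fun y => [", ", pvLbl y]) := by
  rw [PySem.List.enumerate_cons, PySem.List.enumerate_cons]
  simp only [List.foldl_cons]
  norm_num
  rw [pvPartsTail _ _ (fun p hp => by
    rcases (PySem.List.mem_enumerate_iff _ _ _).mp hp with ⟨k, hk, rfl⟩
    simp; omega)]
  rw [pvFlatEnum]
  simp [pvLbl]

-- joining the reversed pieces yields the comma chain plus the " or " tail
theorem pvJoinOr (u : List String) (y1 z : String) :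
    PySem.Str.join "" (u.flatMap (fun y => [pvLbl y, ", "]) ++ [pvLbl y1, " or ", pvLbl z])
      = pvComma (u ++ [y1]) ++ (" or " ++ pvLbl z) := by
  induction u with
  | nil =>
    simp only [List.flatMap_nil, List.nil_append]
    rw [pvJoin0Cons, pvJoin0Cons, pvJoin0Cons, pvJoin0Nil]
    simp [pvComma, String.append_empty]
  | cons a r ih =>
    have hsplit : ((a :: r).flatMap (fun y => [pvLbl y, ", "]) ++ [pvLbl y1, " or ", pvLbl z])
        = pvLbl a :: ", " :: (r.flatMap (fun y => [pvLbl y, ", "]) ++ [pvLbl y1, " or ", pvLbl z]) := by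
      simp
    rw [hsplit, pvJoin0Cons, pvJoin0Cons, ih]
    rcases e : r ++ [y1] with _ | ⟨c, s⟩
    · simp at e
    · rw [show (a :: r) ++ [y1] = a :: (r ++ [y1]) from by simp, e,
        show pvComma (a :: c :: s) = pvLbl a ++ ", " ++ pvComma (c :: s) from rfl, ← e]
      simp [String.append_assoc]

-- B on a nonempty-prefix concat input
theorem pvAltChar (l : List String) (z : String) (hl : l ≠ []) :
    process_socd_alt (l ++ [z]) = pvComma l ++ (" or " ++ pvLbl z) := by
  unfold process_socd_alt
  rw [if_neg (by simp)]
  rcases e : l.reverse with _ | ⟨y1, t⟩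
  · exact absurd (by simpa using congrArg List.reverse e) hl
  · have hrev : (l ++ [z]).reverse = z :: y1 :: t := by simp [e]
    show PySem.Str.join "" (((PySem.List.enumerate (l ++ [z]).reverse 0).foldl
      (fun parts kc =>
        let parts := if kc.1 = 1 then parts ++ [" or "]
          else if kc.1 > 1 then parts ++ [", "] else parts
        parts ++ [PySem.Dict.getD socdNames kc.2 ""]) []).reverse)
      = pvComma l ++ (" or " ++ pvLbl z)
    rw [hrev, pvPartsChar]
    have hpr : (([pvLbl z, " or ", pvLbl y1] ++ t.flatMap (fun y => [", ", pvLbl y])).reverse)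
        = t.reverse.flatMap (fun y => [pvLbl y, ", "]) ++ [pvLbl y1, " or ", pvLbl z] := by
      rw [List.reverse_append, List.reverse_flatMap,
        show (List.reverse ∘ fun y => [", ", pvLbl y]) = fun y => [pvLbl y, ", "] from
          funext (fun y => by simp)]
      simp
    rw [hpr, pvJoinOr]
    have hl' : t.reverse ++ [y1] = l := by
      have := congrArg List.reverse e
      simpa using this.symm
    rw [hl']

-- ---------- A side, length ≥ 2 ----------
theorem pvMain (xs : List String) (k : Nat) (hlen : xs.length = k + 2) :
    (PySem.List.pyRange 0 (xs.length : Int)).foldl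
      (fun r i => r ++ (pvSep xs.length i ++ pvLbl (PySem.List.pyGetD xs i ""))) ""
    = pvComma (xs.take (k+1)) ++ (" or " ++ pvLbl (xs[k+1]'(by omega))) := by
  have hsplit : PySem.List.pyRange 0 (xs.length : Int)
      = PySem.List.pyRange 0 ((k+1 : Nat) : Int) ++ [((k+1 : Nat) : Int)] := by
    rw [hlen]; exact pvRangeSucc (k+1)
  have hinner : List.foldl
      (fun r i => r ++ (pvSep (xs.length : Int) i ++ pvLbl (PySem.List.pyGetD xs i ""))) ""
      (PySem.List.pyRange 0 ((k+1 : Nat) : Int))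
      = pvComma (xs.take (k+1)) := by
    rw [PySem.List.foldl_congr_mem _ _
      (fun r i => r ++ ((if i = 0 then "" else ", ") ++ pvLbl (PySem.List.pyGetD xs i ""))) _
      (fun acc i hi => by
        have hi' := (PySem.List.mem_pyRange_one).mp hi
        by_cases h0 : i = 0
        · simp [pvSep, h0]
        · have hs : pvSep (xs.length : Int) i = ", " := by
            unfold pvSep
            rw [if_neg h0, if_neg (by rw [hlen]; push_cast; omega)]
          simp [hs, h0])]
    exact pvMid xs (k+1) (by omega) (by omega)
  rw [hsplit, List.foldl_append, hinner]
  simp only [List.foldl_cons, List.foldl_nil]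
  have hsep : pvSep (xs.length : Int) ((k+1 : Nat) : Int) = " or " := by
    unfold pvSep
    rw [if_neg (by omega), if_pos (by rw [hlen]; push_cast; omega)]
  have hkl : ((k+1 : Nat) : Int) < (xs.length : Int) := by rw [hlen]; push_cast; omega
  rw [hsep, PySem.List.pyGetD_eq_getElem xs "" (by positivity) hkl]
  simp

-- both programs on an input of length ≥ 2, written as l ++ [z]
theorem pvTwo (l : List String) (z : String) (hl : l ≠ []) :
    process_socd (l ++ [z]) = process_socd_alt (l ++ [z]) := by
  rcases l with _ | ⟨y0, m⟩
  · simp at hl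
  · have hlen : ((y0 :: m) ++ [z]).length = m.length + 2 := by simp
    rw [pvAform _ (by simp), pvMain _ m.length hlen, pvAltChar _ z (by simp)]
    have htake : ((y0 :: m) ++ [z]).take (m.length + 1) = y0 :: m := by
      have : m.length + 1 = (y0 :: m).length := by simp
      rw [this]
      exact List.take_left
    have hget : ((y0 :: m) ++ [z])[m.length + 1]'(by simp) = z := by
      exact List.getElem_concat_length (by simp) _
    rw [htake, hget]

-- ===== VERDICT (by name: the statement is the Claim_ definition above) =====
theorem process_socd_spec : Claim_equal_process_socd := by
  intro xs _
  show process_socd xs = process_socd_alt xs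
  match xs with
  | [] => simp [process_socd, process_socd_alt, bool_to_emoji, String.empty_append]
  | [a] =>
    have hA : process_socd [a] = pvLbl a := by
      rw [pvAform _ (by simp)]
      have hsing : PySem.List.pyRange 0 (([a] : List String).length : Int) = [0] := by
        simpa using PySem.List.pyRange_one_singleton (a := 0)
      rw [hsing]
      simp only [List.foldl_cons, List.foldl_nil]
      rw [show (PySem.List.pyGetD [a] (0:Int) "") = a from by
        rw [show (0:Int) = ((0:Nat):Int) from rfl, PySem.List.pyGetD_natCast]; rfl]
      simp [pvSep, String.empty_append]
    have hB : process_socd_alt [a] = pvLbl a := by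
      unfold process_socd_alt
      rw [if_neg (by simp)]
      show PySem.Str.join "" (((PySem.List.enumerate ([a] : List String).reverse 0).foldl
        (fun parts kc =>
          let parts := if kc.1 = 1 then parts ++ [" or "]
            else if kc.1 > 1 then parts ++ [", "] else parts
          parts ++ [PySem.Dict.getD socdNames kc.2 ""]) []).reverse) = pvLbl a
      simp only [List.reverse_singleton, PySem.List.enumerate_cons, PySem.List.enumerate_nil,
        List.foldl_cons, List.foldl_nil]
      norm_num
      rw [pvJoin0Cons, pvJoin0Nil]
      simp [pvLbl, String.append_empty]
    rw [hA, hB]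
  | a :: b :: t =>
    rcases List.eq_nil_or_concat (a :: b :: t) with h | ⟨l, z, h⟩
    · simp at h
    · have h' : a :: b :: t = l ++ [z] := by simpa [List.concat_eq_append] using h
      have hl : l ≠ [] := by
        intro h0
        rw [h0] at h'
        have := congrArg List.length h'
        simp at this
      rw [h']
      exact pvTwo l z hl
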